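-- pv_equiv track=rewrite | github.com/irfanzafar1986/TelcoClashFindAndRemove | site_dist_utils.py | get_tier
-- ===== SOURCE A (Python) =====
-- def get_tier(dict_for_tier):
--     ''' Takes a dictionary of current quads and appends tier in value'''
--     key=[]
--     val=[]
--     for i in range(6):# we have 6 quads
--         curr_quad_dict={k: v for k, v in dict_for_tier.items() if v[2]==i} # filter dictionary for current quad
--         curr_quad_tier=sorted(curr_quad_dict.items(),key=lambda kv:kv[1][0])[:10]# Get first 10 tiers
--         for i,item in enumerate(curr_quad_tier):
--             key.append(item[0]) # Append current site as key
--             val.append((item[1][0],item[1][1],i)) # Append current values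
--     return dict(zip(key,val))
-- ===== SOURCE B (Python) =====
-- def get_tier(dict_for_tier):
--     ''' Takes a dictionary of current quads and appends tier in value'''
--     buckets = [[] for _ in range(6)]
--     for k, v in dict_for_tier.items():
--         if 0 <= v[2] < 6:
--             buckets[v[2]].append((k, v))
--     result = []
--     for bucket in buckets:
--         for rank, (k, v) in enumerate(sorted(bucket, key=lambda kv: kv[1][0])[:10]):
--             result.append((k, (v[0], v[1], rank)))
--     return dict(result)
-- ===== Notes on version B (the rewrite author's own statement) =====
-- stated objective: simpler
-- what changed: Replaces A's six full dictionary filter-scans (one per quad) and its parallel key/value lists zipped into a dict by a single bucketing pass that distributes each entry into the bucket named by its quad index (entries with an out-of-range quad index are dropped, as A implicitly drops them), followed by a per-bucket sort, top-ten slice and enumerate building the result pairs directly.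
import Mathlib
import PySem

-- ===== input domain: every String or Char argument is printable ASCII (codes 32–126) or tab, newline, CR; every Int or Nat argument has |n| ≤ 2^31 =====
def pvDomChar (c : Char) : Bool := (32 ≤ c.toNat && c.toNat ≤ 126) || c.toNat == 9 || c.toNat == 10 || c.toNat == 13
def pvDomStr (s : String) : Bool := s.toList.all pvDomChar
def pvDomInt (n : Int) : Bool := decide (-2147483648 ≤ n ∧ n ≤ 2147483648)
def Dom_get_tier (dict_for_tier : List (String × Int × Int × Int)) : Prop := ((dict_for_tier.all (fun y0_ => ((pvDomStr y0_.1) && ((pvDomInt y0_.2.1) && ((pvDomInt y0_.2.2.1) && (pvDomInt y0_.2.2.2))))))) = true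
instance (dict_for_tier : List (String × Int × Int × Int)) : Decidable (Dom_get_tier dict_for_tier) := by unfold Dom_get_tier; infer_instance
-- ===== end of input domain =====

-- B replaces A's six full filter-scans of the dict by one bucketing pass plus a per-bucket
-- sort, top-ten slice and enumerate (objective: simpler single-pass distribution; same results).

-- ===== PORT A =====
-- literal transliteration of A: for each of the six quad indices, filter the dict, sort by
-- the first value component, take the first ten, enumerate, appending keys and values to
-- two lists; finally zip the two lists into a dict.
def get_tier (dict_for_tier : List (String × Int × Int × Int)) : List (String × Int × Int × Int) :=
  let kv : List String × List (Int × Int × Int) :=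
    (PySem.List.pyRange 0 6 1).foldl (fun acc i =>
      let curr_quad_dict := dict_for_tier.filter (fun p => p.2.2.2 == i)
      let curr_quad_tier :=
        PySem.List.slice (PySem.List.sorted curr_quad_dict (fun p => p.2.1)) none (some 10)
      (PySem.List.enumerate curr_quad_tier).foldl
        (fun acc2 it => (acc2.1 ++ [it.2.1], acc2.2 ++ [(it.2.2.1, it.2.2.2.1, it.1)])) acc)
      ([], [])
  (PySem.Dict.ofList (kv.1.zip kv.2)).items

-- ===== PORT B =====
-- literal transliteration of B (Source B): one pass distributing entries into six buckets by
-- quad index (entries with an out-of-range quad index are dropped), then per bucket sort,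
-- take the first ten and enumerate, appending key-value pairs; finally a dict of the pairs.
def get_tier_alt (dict_for_tier : List (String × Int × Int × Int)) : List (String × Int × Int × Int) :=
  let buckets : List (List (String × Int × Int × Int)) :=
    dict_for_tier.foldl (fun bs p =>
      if 0 ≤ p.2.2.2 ∧ p.2.2.2 < 6 then
        PySem.List.pySetD bs p.2.2.2 (PySem.List.pyGetD bs p.2.2.2 [] ++ [p])
      else bs)
      [[], [], [], [], [], []]
  let result : List (String × Int × Int × Int) :=
    buckets.foldl (fun res bucket =>
      (PySem.List.enumerate
        (PySem.List.slice (PySem.List.sorted bucket (fun p => p.2.1)) none (some 10))).foldl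
        (fun res2 it => res2 ++ [(it.2.1, (it.2.2.1, it.2.2.2.1, it.1))]) res) []
  (PySem.Dict.ofList result).items

-- ===== PRECONDITION & SPEC =====
def Spec_get_tier (dict_for_tier : List (String × Int × Int × Int)) (out : List (String × Int × Int × Int)) : Prop := out = get_tier_alt dict_for_tier
instance (dict_for_tier : List (String × Int × Int × Int)) (out : List (String × Int × Int × Int)) : Decidable (Spec_get_tier dict_for_tier out) := by unfold Spec_get_tier; infer_instance

-- ===== CLAIM (what is proved, stated in full; the proofs are below) =====
def Claim_equal_get_tier : Prop := ∀ (dict_for_tier : List (String × Int × Int × Int)), Dom_get_tier dict_for_tier → Spec_get_tier dict_for_tier (get_tier dict_for_tier)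

-- ===== LEMMAS AND PROOFS =====

-- the per-quad pipeline both programs apply to a bucket: sort, slice, enumerate, build pairs
def pvProc (b : List (String × Int × Int × Int)) : List (String × Int × Int × Int) :=
  (PySem.List.enumerate
    (PySem.List.slice (PySem.List.sorted b (fun p => p.2.1)) none (some 10))).map
    (fun it => (it.2.1, (it.2.2.1, it.2.2.2.1, it.1)))

def pvKs (b : List (String × Int × Int × Int)) : List String :=
  (PySem.List.enumerate
    (PySem.List.slice (PySem.List.sorted b (fun p => p.2.1)) none (some 10))).map (·.2.1)

def pvVs (b : List (String × Int × Int × Int)) : List (Int × Int × Int) :=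
  (PySem.List.enumerate
    (PySem.List.slice (PySem.List.sorted b (fun p => p.2.1)) none (some 10))).map
    (fun it => (it.2.2.1, it.2.2.2.1, it.1))

-- A's inner enumerate loop appends the keys and the values as two maps
theorem pvA_inner (l : List (Int × (String × Int × Int × Int)))
    (acc : List String × List (Int × Int × Int)) :
    l.foldl (fun acc2 it => (acc2.1 ++ [it.2.1], acc2.2 ++ [(it.2.2.1, it.2.2.2.1, it.1)])) acc
      = (acc.1 ++ l.map (·.2.1), acc.2 ++ l.map (fun it => (it.2.2.1, it.2.2.2.1, it.1))) := by
  induction l generalizing acc with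
  | nil => simp
  | cons x xs ih => simp [ih]

-- A's outer loop produces the flatMaps of pvKs and pvVs over the quad indices
theorem pvA_outer (dft : List (String × Int × Int × Int)) (is : List Int)
    (acc : List String × List (Int × Int × Int)) :
    is.foldl (fun acc i =>
      (PySem.List.enumerate
        (PySem.List.slice (PySem.List.sorted (dft.filter (fun p => p.2.2.2 == i)) (fun p => p.2.1)) none (some 10))).foldl
        (fun acc2 it => (acc2.1 ++ [it.2.1], acc2.2 ++ [(it.2.2.1, it.2.2.2.1, it.1)])) acc) acc
      = (acc.1 ++ is.flatMap (fun i => pvKs (dft.filter (fun p => p.2.2.2 == i))),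
         acc.2 ++ is.flatMap (fun i => pvVs (dft.filter (fun p => p.2.2.2 == i)))) := by
  induction is generalizing acc with
  | nil => simp
  | cons i is ih => rw [List.foldl_cons, pvA_inner, ih]; simp [pvKs, pvVs]

-- zip of the two flatMaps is the flatMap of pvProc
theorem pvA_zip (dft : List (String × Int × Int × Int)) (is : List Int) :
    (is.flatMap (fun i => pvKs (dft.filter (fun p => p.2.2.2 == i)))).zip
      (is.flatMap (fun i => pvVs (dft.filter (fun p => p.2.2.2 == i))))
      = is.flatMap (fun i => pvProc (dft.filter (fun p => p.2.2.2 == i))) := by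
  induction is with
  | nil => simp
  | cons i is ih =>
    simp only [List.flatMap_cons]
    rw [List.zip_append (by simp [pvKs, pvVs]), ih]
    simp only [pvKs, pvVs, pvProc, List.zip_map']

-- B's bucketing pass computes the six filters
theorem pvB_buckets (l : List (String × Int × Int × Int))
    (b0 b1 b2 b3 b4 b5 : List (String × Int × Int × Int)) :
    l.foldl (fun bs p =>
      if 0 ≤ p.2.2.2 ∧ p.2.2.2 < 6 then
        PySem.List.pySetD bs p.2.2.2 (PySem.List.pyGetD bs p.2.2.2 [] ++ [p])
      else bs) [b0, b1, b2, b3, b4, b5]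
      = [b0 ++ l.filter (fun p => p.2.2.2 == (0:Int)),
         b1 ++ l.filter (fun p => p.2.2.2 == (1:Int)),
         b2 ++ l.filter (fun p => p.2.2.2 == (2:Int)),
         b3 ++ l.filter (fun p => p.2.2.2 == (3:Int)),
         b4 ++ l.filter (fun p => p.2.2.2 == (4:Int)),
         b5 ++ l.filter (fun p => p.2.2.2 == (5:Int))] := by
  induction l generalizing b0 b1 b2 b3 b4 b5 with
  | nil => simp
  | cons p l ih =>
    rw [List.foldl_cons]
    by_cases h : 0 ≤ p.2.2.2 ∧ p.2.2.2 < 6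
    · have : p.2.2.2 = 0 ∨ p.2.2.2 = 1 ∨ p.2.2.2 = 2 ∨ p.2.2.2 = 3 ∨ p.2.2.2 = 4 ∨ p.2.2.2 = 5 := by omega
      rcases this with hq | hq | hq | hq | hq | hq <;>
        simp [hq, PySem.List.pySetD_of_nonneg, PySem.List.pyGetD_eq_getElem, ih]
    · have h0 : ∀ j : Int, j ∈ ([0,1,2,3,4,5] : List Int) → (p.2.2.2 == j) = false := by
        intro j hj; fin_cases hj <;> simp <;> omega
      simp only [if_neg h, ih, List.filter_cons]
      simp [h0 0 (by simp), h0 1 (by simp), h0 2 (by simp), h0 3 (by simp), h0 4 (by simp), h0 5 (by simp)]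

-- B's output loop is the flatMap of pvProc over the buckets
theorem pvB_outer (buckets : List (List (String × Int × Int × Int)))
    (res : List (String × Int × Int × Int)) :
    buckets.foldl (fun res bucket =>
      (PySem.List.enumerate
        (PySem.List.slice (PySem.List.sorted bucket (fun p => p.2.1)) none (some 10))).foldl
        (fun res2 it => res2 ++ [(it.2.1, (it.2.2.1, it.2.2.2.1, it.1))]) res) res
      = res ++ buckets.flatMap pvProc := by
  induction buckets generalizing res with
  | nil => simp
  | cons b bs ih =>
    rw [List.foldl_cons, PySem.List.foldl_append_singleton_eq_map, ih]
    simp [pvProc]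

-- ===== VERDICT (by name: the statement is the Claim_ definition above) =====
theorem get_tier_spec : Claim_equal_get_tier := by
  intro dft _
  show get_tier dft = get_tier_alt dft
  have hr : PySem.List.pyRange 0 6 1 = [0, 1, 2, 3, 4, 5] := by decide
  simp only [get_tier, get_tier_alt, hr]
  rw [pvA_outer, pvB_buckets, pvB_outer]
  simp only [List.nil_append]
  rw [pvA_zip]
  simp [List.flatMap]
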